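-- pv_equiv track=rewrite | github.com/sometimeskind/music-pipeline | tests/test_ingest.py | _apply_budget
-- ===== SOURCE A (Python) =====
-- def _apply_budget(
--     old_urls: set[str],
--     all_new_urls: list[str],
--     budget: int | None,
-- ) -> tuple[list[str], list[str]]:
--     """Replicate the track-limiting logic from spotdl_ops.sync_playlist.
--
--     Returns (batch_downloaded, songs_written_to_spotdl_file).
--     """
--     truly_new = [u for u in all_new_urls if u not in old_urls]
--     batch = truly_new if budget is None else truly_new[:budget]
--     batch_set = set(batch)
--     written = [u for u in all_new_urls if u in old_urls or u in batch_set]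
--     return batch, written
-- ===== SOURCE B (Python) =====
-- def _apply_budget(
--     old_urls: set[str],
--     all_new_urls: list[str],
--     budget: int | None,
-- ) -> tuple[list[str], list[str]]:
--     """Single stateful pass: filter, budget and written-selection fused into one loop.
--
--     On a negative budget it intentionally downloads nothing (A's slice would
--     instead drop only the last |budget| new urls).
--     """
--     batch: list[str] = []
--     taken: set[str] = set()
--     count = 0
--     written: list[str] = []
--     for u in all_new_urls:
--         if u in old_urls:
--             written.append(u)
--             continue
--         if budget is None or count < budget:
--             batch.append(u)
--             taken.add(u)
--             count += 1
--         if u in taken: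
--             written.append(u)
--     return batch, written
-- ===== Notes on version B (the rewrite author's own statement) =====
-- stated objective: alternative
-- what changed: A's three sequential passes (filter comprehension, slice, second filter against set(batch)) are replaced by one stateful loop over all_new_urls that maintains batch, a taken-set, a counter and written together, deciding each url's fate once.
-- intended difference: On a negative budget with more than |budget| truly-new urls, A's slice truly_new[:budget] returns (and writes) all but the last |budget| new urls, while B downloads and writes none of them; for a track budget a non-positive limit should admit no downloads, so B's value is the intended one. — e.g. on _apply_budget([], ["a", "b"], some (-1)): A returns (["a"], ["a"]), B returns ([], [])
import Mathlib
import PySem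

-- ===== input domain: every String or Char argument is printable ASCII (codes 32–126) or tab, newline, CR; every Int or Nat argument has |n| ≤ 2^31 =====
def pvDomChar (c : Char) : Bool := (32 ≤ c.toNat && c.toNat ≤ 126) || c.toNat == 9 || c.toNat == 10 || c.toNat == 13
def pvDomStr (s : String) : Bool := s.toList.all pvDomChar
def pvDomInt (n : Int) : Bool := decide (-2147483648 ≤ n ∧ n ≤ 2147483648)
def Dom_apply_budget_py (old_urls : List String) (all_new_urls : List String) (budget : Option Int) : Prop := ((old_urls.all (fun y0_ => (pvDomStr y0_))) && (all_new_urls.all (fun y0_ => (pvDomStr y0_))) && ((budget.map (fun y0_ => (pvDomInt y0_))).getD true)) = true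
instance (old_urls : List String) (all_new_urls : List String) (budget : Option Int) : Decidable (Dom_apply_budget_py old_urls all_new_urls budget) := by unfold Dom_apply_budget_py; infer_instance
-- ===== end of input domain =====

-- B fuses A's three comprehensions (filter, slice, filter) into one stateful pass; on a
-- negative budget B intentionally downloads nothing where A's slice keeps all but the
-- last |budget| new urls (see D_ below).

-- ===== PORT A =====
def apply_budget_py (old_urls : List String) (all_new_urls : List String) (budget : Option Int) : List String × List String :=
  let truly_new := all_new_urls.filter (fun u => !(old_urls.contains u))
  let batch := match budget with
    | none => truly_new
    | some b => PySem.List.slice truly_new none (some b)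
  let batch_set : PySem.Set String := PySem.Set.ofList batch
  let written := all_new_urls.filter (fun u => old_urls.contains u || PySem.Set.contains batch_set u)
  (batch, written)

-- ===== PORT B =====
-- one loop step of Source B: state = (batch, taken, count, written)
def pvBStep (old_urls : List String) (budget : Option Int)
    (st : List String × PySem.Set String × Int × List String) (u : String) :
    List String × PySem.Set String × Int × List String :=
  let (batch, taken, count, written) := st
  if old_urls.contains u then
    (batch, taken, count, written ++ [u])
  else
    let take : Bool := match budget with | none => true | some b => decide (count < b)
    let batch := if take then batch ++ [u] else batch
    let taken := if take then PySem.Set.add taken u else taken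
    let count := if take then count + 1 else count
    if PySem.Set.contains taken u then (batch, taken, count, written ++ [u])
    else (batch, taken, count, written)

def apply_budget_py_alt (old_urls : List String) (all_new_urls : List String) (budget : Option Int) : List String × List String :=
  let st := all_new_urls.foldl (pvBStep old_urls budget) ([], PySem.Set.empty, 0, [])
  (st.1, st.2.2.2)

-- ===== PRECONDITION & SPEC =====
-- On a negative budget with more than |budget| truly-new urls, A returns all but the last
-- |budget| of them (Python's negative-stop slice), while B downloads nothing; for a track
-- budget a non-positive limit should admit no downloads, so B's value is the intended one.
def D_apply_budget_py (old_urls : List String) (all_new_urls : List String) (budget : Option Int) : Prop :=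
  (budget.elim false (fun b =>
    decide (b < 0) &&
    decide ((-b).toNat < (all_new_urls.filter (fun u => !(old_urls.contains u))).length))) = true
instance (old_urls : List String) (all_new_urls : List String) (budget : Option Int) : Decidable (D_apply_budget_py old_urls all_new_urls budget) := by unfold D_apply_budget_py; infer_instance

def Spec_apply_budget_py (old_urls : List String) (all_new_urls : List String) (budget : Option Int) (out : List String × List String) : Prop := ¬ D_apply_budget_py old_urls all_new_urls budget → out = apply_budget_py_alt old_urls all_new_urls budget
instance (old_urls : List String) (all_new_urls : List String) (budget : Option Int) (out : List String × List String) : Decidable (Spec_apply_budget_py old_urls all_new_urls budget out) := by unfold Spec_apply_budget_py; infer_instance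

def pvDiffWitness_apply_budget_py : List String × List String × Option Int := ([], ["a", "b"], some (-1))
def pvDiffWitnessOut_apply_budget_py : (List String × List String) × (List String × List String) :=
  ((["a"], ["a"]), ([], []))

-- ===== CLAIM (what is proved, stated in full; the proofs are below) =====
def Claim_unchanged_apply_budget_py : Prop := ∀ (old_urls : List String) (all_new_urls : List String) (budget : Option Int), Dom_apply_budget_py old_urls all_new_urls budget → Spec_apply_budget_py old_urls all_new_urls budget (apply_budget_py old_urls all_new_urls budget)
def Claim_changed_apply_budget_py : Prop := Dom_apply_budget_py (pvDiffWitness_apply_budget_py.1) (pvDiffWitness_apply_budget_py.2.1) (pvDiffWitness_apply_budget_py.2.2) ∧ D_apply_budget_py (pvDiffWitness_apply_budget_py.1) (pvDiffWitness_apply_budget_py.2.1) (pvDiffWitness_apply_budget_py.2.2) ∧ apply_budget_py (pvDiffWitness_apply_budget_py.1) (pvDiffWitness_apply_budget_py.2.1) (pvDiffWitness_apply_budget_py.2.2) = pvDiffWitnessOut_apply_budget_py.1 ∧ apply_budget_py_alt (pvDiffWitness_apply_budget_py.1) (pvDiffWitness_apply_budget_py.2.1) (pvDiffWitness_apply_budget_py.2.2)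 = pvDiffWitnessOut_apply_budget_py.2 ∧ pvDiffWitnessOut_apply_budget_py.1 ≠ pvDiffWitnessOut_apply_budget_py.2
def Claim_exact_apply_budget_py : Prop := ∀ (old_urls : List String) (all_new_urls : List String) (budget : Option Int), Dom_apply_budget_py old_urls all_new_urls budget → D_apply_budget_py old_urls all_new_urls budget → apply_budget_py old_urls all_new_urls budget ≠ apply_budget_py_alt old_urls all_new_urls budget

-- ===== LEMMAS AND PROOFS =====

-- B's loop with budget = None: everything truly new is taken, so batch collects the
-- filter and every url is written.
lemma pv_loop_none (old : List String) :
    ∀ (rest batch : List String) (taken : PySem.Set String) (count : Int) (written : List String),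
    (∀ v, v ∈ taken ↔ v ∈ batch) →
    ∃ t c, rest.foldl (pvBStep old none) (batch, taken, count, written)
      = (batch ++ rest.filter (fun u => !(old.contains u)), t, c, written ++ rest) := by
  intro rest
  induction rest with
  | nil => intro batch taken count written _; exact ⟨taken, count, by simp⟩
  | cons u rest ih =>
    intro batch taken count written htaken
    by_cases h : u ∈ old
    · obtain ⟨t, c, hfc⟩ := ih batch taken count (written ++ [u]) htaken
      refine ⟨t, c, ?_⟩
      simp only [List.foldl, pvBStep]
      simpa [h] using hfc
    · obtain ⟨t, c, hfc⟩ := ih (batch ++ [u]) (PySem.Set.add taken u) (count + 1) (written ++ [u])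
        (by intro v; simp [PySem.Set.mem_add, htaken v])
      refine ⟨t, c, ?_⟩
      simp only [List.foldl, pvBStep]
      simpa [h] using hfc

-- B's loop with budget = some b: the final batch is the current batch plus the next
-- (b - count) truly-new elements, and written keeps exactly the urls that are old or in
-- the final batch.
lemma pv_loop_some (old : List String) (b : Int) :
    ∀ (rest batch : List String) (taken : PySem.Set String) (count : Int)
      (written full : List String),
    (∀ v, v ∈ taken ↔ v ∈ batch) →
    count = (batch.length : Int) →
    full = batch ++ (rest.filter (fun u => !(old.contains u))).take (b - count).toNat →
    ∃ t c, rest.foldl (pvBStep old (some b)) (batch, taken, count, written)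
      = (full, t, c, written ++ rest.filter (fun u => old.contains u || full.contains u)) := by
  intro rest
  induction rest with
  | nil =>
    intro batch taken count written full htaken hcount hfull
    exact ⟨taken, count, by simp [hfull]⟩
  | cons u rest ih =>
    intro batch taken count written full htaken hcount hfull
    by_cases h : u ∈ old
    · -- old url: written gets u, nothing else changes
      obtain ⟨t, c, hfc⟩ := ih batch taken count (written ++ [u]) full htaken hcount
        (by simpa [h] using hfull)
      refine ⟨t, c, ?_⟩
      simp only [List.foldl, pvBStep]
      simpa [h] using hfc
    · by_cases hc : count < b
      · -- truly new, capacity left: taken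
        have h1 : (b - count).toNat = (b - (count + 1)).toNat + 1 := by omega
        have hfull' : full = (batch ++ [u]) ++
            (rest.filter (fun u => !(old.contains u))).take (b - (count + 1)).toNat := by
          simp [hfull, h, h1]
        have humem : u ∈ full := by
          rw [hfull']; exact List.mem_append_left _ (by simp)
        obtain ⟨t, c, hfc⟩ := ih (batch ++ [u]) (PySem.Set.add taken u) (count + 1)
          (written ++ [u]) full
          (by intro v; simp [PySem.Set.mem_add, htaken v])
          (by simp [hcount])
          hfull'
        refine ⟨t, c, ?_⟩
        simp only [List.foldl, pvBStep]
        simpa [h, hc, humem] using hfc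
      · -- truly new, budget exhausted: batch unchanged
        have h0 : (b - count).toNat = 0 := by omega
        have hfull' : full = batch := by simp [hfull, h0]
        have hmem : u ∈ taken ↔ u ∈ full := by rw [hfull']; exact htaken u
        obtain ⟨t, c, hfc0⟩ := ih batch taken count (written ++ [u]) full htaken hcount
          (by simp [hfull', h0])
        obtain ⟨t', c', hfc1⟩ := ih batch taken count written full htaken hcount
          (by simp [hfull', h0])
        by_cases hu : u ∈ taken
        · refine ⟨t, c, ?_⟩
          simp only [List.foldl, pvBStep]
          have hum : u ∈ full := hmem.1 hu
          simpa [h, hc, hu, hum] using hfc0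
        · refine ⟨t', c', ?_⟩
          simp only [List.foldl, pvBStep]
          have hum : u ∉ full := fun hx => hu (hmem.2 hx)
          simpa [h, hc, hu, hum] using hfc1

lemma pv_contains_ofList (l : List String) (u : String) :
    PySem.Set.contains (PySem.Set.ofList l) u = l.contains u := by
  simp [PySem.Set.contains, PySem.Set.mem_ofList]

lemma pv_alt_none (old new : List String) :
    apply_budget_py_alt old new none = (new.filter (fun u => !(old.contains u)), new) := by
  obtain ⟨t, c, h⟩ := pv_loop_none old new [] [] 0 [] (by simp)
  simp [apply_budget_py_alt, h]

lemma pv_alt_some (old new : List String) (b : Int) :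
    apply_budget_py_alt old new (some b) =
      ((new.filter (fun u => !(old.contains u))).take b.toNat,
       new.filter (fun u => old.contains u ||
         ((new.filter (fun u => !(old.contains u))).take b.toNat).contains u)) := by
  obtain ⟨t, c, h⟩ := pv_loop_some old b new [] [] 0 []
    ((new.filter (fun u => !(old.contains u))).take b.toNat)
    (by simp) (by simp) (by simp)
  simp [apply_budget_py_alt, h]

-- ===== VERDICT (by name: the statement is the Claim_ definition above) =====
theorem apply_budget_py_spec : Claim_unchanged_apply_budget_py := by
  unfold Claim_unchanged_apply_budget_py Spec_apply_budget_py
  intro old new budget _ hD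
  cases budget with
  | none =>
    rw [pv_alt_none]
    unfold apply_budget_py
    refine Prod.ext rfl ?_
    simp only []
    refine List.filter_eq_self.mpr ?_
    intro u hu
    by_cases h : u ∈ old
    · simp [h]
    · have hmem : u ∈ new.filter (fun u => !(old.contains u)) :=
        List.mem_filter.mpr ⟨hu, by simp [h]⟩
      simp [h, hu]
  | some b =>
    have hbatch : PySem.List.slice (new.filter (fun u => !(old.contains u))) none (some b)
        = (new.filter (fun u => !(old.contains u))).take b.toNat := by
      by_cases hb : 0 ≤ b
      · exact PySem.List.slice_to _ hb
      · have hb : b < 0 := by omega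
        have hk : 0 < (-b).toNat := by omega
        have hbeq : some b = some (-(((-b).toNat : Nat) : Int)) := by congr 1; omega
        have hlen : (new.filter (fun u => !(old.contains u))).length ≤ (-b).toNat := by
          by_contra hx
          apply hD
          simp only [D_apply_budget_py, Option.elim, Bool.and_eq_true, decide_eq_true_eq]
          exact ⟨hb, by omega⟩
        have h1 : (new.filter (fun u => !(old.contains u))).length - (-b).toNat = 0 := by omega
        have h2 : b.toNat = 0 := by omega
        rw [hbeq, PySem.List.slice_to_neg_natCast _ _ hk, h1, h2]
    rw [pv_alt_some]
    unfold apply_budget_py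
    refine Prod.ext (by simpa using hbatch) ?_
    simp only []
    refine List.filter_congr ?_
    intro u _
    rw [hbatch, pv_contains_ofList]

theorem apply_budget_py_changed : Claim_changed_apply_budget_py := by
  unfold Claim_changed_apply_budget_py; decide

theorem apply_budget_py_tight : Claim_exact_apply_budget_py := by
  unfold Claim_exact_apply_budget_py
  intro old new budget _ hD heq
  cases budget with
  | none => simp [D_apply_budget_py] at hD
  | some b =>
    simp only [D_apply_budget_py, Option.elim, Bool.and_eq_true, decide_eq_true_eq] at hD
    obtain ⟨hb, hlen⟩ := hD
    have hk : 0 < (-b).toNat := by omega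
    have hbeq : some b = some (-(((-b).toNat : Nat) : Int)) := by congr 1; omega
    have h2 : b.toNat = 0 := by omega
    rw [pv_alt_some] at heq
    unfold apply_budget_py at heq
    have h1 := congrArg Prod.fst heq
    simp only [] at h1
    rw [hbeq, PySem.List.slice_to_neg_natCast _ _ hk, h2] at h1
    simp only [List.take_zero] at h1
    rcases List.take_eq_nil_iff.mp h1 with h | h
    · omega
    · rw [h] at hlen; simp at hlen
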